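-- pv_equiv track=rewrite | github.com/PsychoTea/aoc2025 | day6/puzzle2.py | coalesce_number
-- ===== SOURCE A (Python) =====
-- def coalesce_number(arr):
--     number = 0
--
--     for digit in arr:
--         if digit == ' ':
--             continue
--
--         number *= 10
--         number += int(digit)
--
--     return number
-- ===== SOURCE B (Python) =====
-- def coalesce_number(arr):
--     digits = [int(s) for s in arr if s != ' ']
--     return sum(v * 10 ** i for i, v in enumerate(reversed(digits)))
-- ===== Notes on version B (the rewrite author's own statement) =====
-- stated objective: alternative
-- what changed: Replaces A's fused Horner accumulator loop with two passes: gather the parsed non-space values, then combine them as a positional weighted sum of powers of ten over the reversed list.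
import Mathlib
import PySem

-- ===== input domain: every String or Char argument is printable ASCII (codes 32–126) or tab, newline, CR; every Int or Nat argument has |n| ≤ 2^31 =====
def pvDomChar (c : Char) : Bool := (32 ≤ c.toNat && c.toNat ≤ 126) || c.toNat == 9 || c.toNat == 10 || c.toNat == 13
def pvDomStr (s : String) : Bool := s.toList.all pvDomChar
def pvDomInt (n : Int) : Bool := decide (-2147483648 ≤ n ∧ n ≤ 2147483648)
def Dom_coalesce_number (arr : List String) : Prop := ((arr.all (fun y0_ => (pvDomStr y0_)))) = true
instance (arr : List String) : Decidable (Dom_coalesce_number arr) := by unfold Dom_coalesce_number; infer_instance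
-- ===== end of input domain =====

-- B replaces A's fused Horner accumulator loop with two passes: gather the parsed
-- non-space values, then sum them with explicit positional powers of ten (alternative decomposition, same cost).


-- ===== PORT A =====
def coalesce_number (arr : List String) : Int :=
  arr.foldl (fun number digit =>
    if digit == " " then number
    else number * 10 + (PySem.Int.ofStr? digit).getD 0) 0
  -- Pre_ guarantees ofStr? is some on every non-space element, so getD 0 is never the default

-- ===== PORT B =====
def coalesce_number_alt (arr : List String) : Int :=
  let digits := (arr.filter (fun s => s != " ")).map (fun s => (PySem.Int.ofStr? s).getD 0)
  -- enumerate(reversed(digits)) with nonnegative indices → zipIdx over the reversed list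
  (digits.reverse.zipIdx.map (fun p => p.1 * (10 : Int) ^ p.2)).sum

-- ===== PRECONDITION & SPEC =====
-- Pre_ excludes exactly the inputs on which A (and B) raise ValueError: a non-space element int() cannot parse.
def Pre_coalesce_number (arr : List String) : Prop :=
  ∀ s ∈ arr, s = " " ∨ (PySem.Int.ofStr? s).isSome = true
instance (arr : List String) : Decidable (Pre_coalesce_number arr) := by
  unfold Pre_coalesce_number; infer_instance
def pvWitness_coalesce_number : List String := ["1", " ", "-2", "34"]

def Spec_coalesce_number (arr : List String) (out : Int) : Prop := out = coalesce_number_alt arr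
instance (arr : List String) (out : Int) : Decidable (Spec_coalesce_number arr out) := by unfold Spec_coalesce_number; infer_instance

-- ===== CLAIM (what is proved, stated in full; the proofs are below) =====
def Claim_equal_coalesce_number : Prop := ∀ (arr : List String), Dom_coalesce_number arr → Pre_coalesce_number arr → Spec_coalesce_number arr (coalesce_number arr)

-- ===== LEMMAS AND PROOFS =====

-- B's weighted sum, as a function of the parsed digit list
def pvW (ds : List Int) : Int :=
  (ds.reverse.zipIdx.map (fun p => p.1 * (10 : Int) ^ p.2)).sum

theorem pvW_cons (v : Int) (tl : List Int) :
    pvW (v :: tl) = v * (10 : Int) ^ tl.length + pvW tl := by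
  simp [pvW, List.zipIdx_append, add_comm]

theorem pv_horner_eq_W (ds : List Int) : ∀ acc : Int,
    ds.foldl (fun a v => a * 10 + v) acc = acc * (10 : Int) ^ ds.length + pvW ds := by
  induction ds with
  | nil => intro acc; simp [pvW]
  | cons v tl ih =>
    intro acc
    simp only [List.foldl_cons, ih, pvW_cons, List.length_cons]
    ring

theorem pv_foldA_eq_horner (arr : List String) : ∀ acc : Int,
    arr.foldl (fun number digit =>
      if digit == " " then number
      else number * 10 + (PySem.Int.ofStr? digit).getD 0) acc
    = ((arr.filter (fun s => s != " ")).map (fun s => (PySem.Int.ofStr? s).getD 0)).foldl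
        (fun a v => a * 10 + v) acc := by
  induction arr with
  | nil => intro acc; simp
  | cons s tl ih =>
    intro acc
    by_cases h : s = " "
    · simpa [h] using ih acc
    · simpa [h] using ih (acc * 10 + (PySem.Int.ofStr? s).getD 0)

-- ===== VERDICT (by name: the statement is the Claim_ definition above) =====
theorem coalesce_number_spec : Claim_equal_coalesce_number := by
  intro arr _ _
  unfold Spec_coalesce_number coalesce_number coalesce_number_alt
  rw [pv_foldA_eq_horner, pv_horner_eq_W]
  simp [pvW]
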